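-- pv_equiv track=rewrite | github.com/Fondamenti18/fondamenti-di-programmazione | students/1815606/homework01/program03.py | modifica_chiave
-- ===== SOURCE A (Python) =====
-- def modifica_chiave(diz,chiave):
--        '''prende la chiave e la trasforma nella nuova chiave senza ricorrenze e composta solo dai caratteri che
--        vanno da A a Z'''
--        nuovaChiave=''
--        chiaveFin=''
--
--        for lettera in chiave:
--            if lettera in diz:
--                   nuovaChiave+=lettera
--
--
--        countLettere=0
--        while countLettere<len(nuovaChiave):
--               countRicorrenza=nuovaChiave.count(nuovaChiave[countLettere])
--               if countRicorrenza>1: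
--                      chiaveFin= nuovaChiave.replace(nuovaChiave[countLettere],'',(countRicorrenza-(countRicorrenza-1)))
--                      nuovaChiave=chiaveFin
--                      countLettere=countLettere
--               else:
--                      countLettere+=1
--
--        return nuovaChiave
-- ===== SOURCE B (Python) =====
-- def modifica_chiave(diz, chiave):
--     '''prende la chiave e la trasforma nella nuova chiave senza ricorrenze e composta solo dai caratteri che
--     vanno da A a Z'''
--     filtered = [lettera for lettera in chiave if lettera in diz]
--     seen = set()
--     out = []
--     for lettera in reversed(filtered):
--         if lettera not in seen:
--             out.append(lettera)
--             seen.add(lettera)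
--     return ''.join(reversed(out))
-- ===== Notes on version B (the rewrite author's own statement) =====
-- stated objective: idiomatic
-- what changed: Replaces A's destructive while-loop that repeatedly counts and removes first occurrences via str.count/str.replace with a single reverse pass over the filtered characters keeping a seen-set (keep first occurrence in reverse order, then reverse back), preserving last-occurrence order.
import Mathlib
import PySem

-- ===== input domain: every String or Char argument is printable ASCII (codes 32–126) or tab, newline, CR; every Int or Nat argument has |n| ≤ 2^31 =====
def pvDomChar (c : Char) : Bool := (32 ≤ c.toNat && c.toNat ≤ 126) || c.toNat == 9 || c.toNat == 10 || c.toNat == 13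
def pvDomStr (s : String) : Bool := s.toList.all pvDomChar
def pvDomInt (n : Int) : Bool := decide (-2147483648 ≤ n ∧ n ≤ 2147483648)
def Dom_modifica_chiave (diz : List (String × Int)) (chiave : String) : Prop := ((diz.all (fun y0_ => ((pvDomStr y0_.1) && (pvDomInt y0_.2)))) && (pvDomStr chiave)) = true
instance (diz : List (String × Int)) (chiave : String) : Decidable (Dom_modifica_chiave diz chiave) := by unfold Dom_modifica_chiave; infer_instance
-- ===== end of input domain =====

-- B replaces A's count/replace-first dedup while-loop by one reverse pass with a seen set (return value only; neither version mutates its arguments).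

-- ===== PORT A =====
-- A's while loop on nuovaChiave: at index i, if the current character occurs more than once,
-- remove its FIRST occurrence (Python nuovaChiave.replace(ch, '', 1), exact for a one-character
-- pattern = List.erase) and keep the index; otherwise advance the index.
-- Python s.count(ch) for a one-character ch is exactly List.count.
def pvLoopA (s : List Char) (i : Nat) : List Char :=
  if h : i < s.length then
    let ch := s[i]
    if s.count ch > 1 then
      pvLoopA (s.erase ch) i
    else
      pvLoopA s (i + 1)
  else s
termination_by s.length - i
decreasing_by
  · have hm : s[i] ∈ s := List.getElem_mem h
    rw [List.length_erase_of_mem hm]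
    omega
  · omega

-- 'lettera in diz' tests whether the one-character string is a key of the dict.
def modifica_chiave (diz : List (String × Int)) (chiave : String) : String :=
  let nuovaChiave := chiave.toList.foldl
    (fun acc lettera => if diz.any (fun kv => kv.1.toList == [lettera]) then acc ++ [lettera] else acc) []
  String.mk (pvLoopA nuovaChiave 0)

-- ===== PORT B =====
-- filter, then one pass over the REVERSED filtered list with a seen set (keep first = last
-- occurrence), finally reverse the accumulator back.
def modifica_chiave_alt (diz : List (String × Int)) (chiave : String) : String :=
  let filtered := chiave.toList.filter (fun lettera => diz.any (fun kv => kv.1.toList == [lettera]))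
  let st := filtered.reverse.foldl
    (fun (st : List Char × PySem.Set Char) lettera =>
      if PySem.Set.contains st.2 lettera then st else (st.1 ++ [lettera], PySem.Set.add st.2 lettera))
    ([], PySem.Set.empty)
  String.mk st.1.reverse

-- ===== PRECONDITION & SPEC =====
def Spec_modifica_chiave (diz : List (String × Int)) (chiave : String) (out : String) : Prop := out = modifica_chiave_alt diz chiave
instance (diz : List (String × Int)) (chiave : String) (out : String) : Decidable (Spec_modifica_chiave diz chiave out) := by unfold Spec_modifica_chiave; infer_instance

-- ===== CLAIM (what is proved, stated in full; the proofs are below) =====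
def Claim_equal_modifica_chiave : Prop := ∀ (diz : List (String × Int)) (chiave : String), Dom_modifica_chiave diz chiave → Spec_modifica_chiave diz chiave (modifica_chiave diz chiave)

-- ===== LEMMAS AND PROOFS =====

-- keep-the-last-occurrence deduplication: the common characterisation of both programs
def pvDedupLast : List Char → List Char
  | [] => []
  | c :: t => if c ∈ t then pvDedupLast t else c :: pvDedupLast t

theorem pvMem_dedupLast (c : Char) (t : List Char) : c ∈ pvDedupLast t ↔ c ∈ t := by
  induction t with
  | nil => simp [pvDedupLast]
  | cons d t ih =>
    by_cases h : d ∈ t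
    · simp only [pvDedupLast, if_pos h, ih, List.mem_cons]
      constructor
      · exact Or.inr
      · rintro (rfl | hc)
        · exact h
        · exact hc
    · simp [pvDedupLast, if_neg h, ih]

-- A's loop, run from a deduplicated prefix p whose characters do not recur in t,
-- deduplicates t keeping last occurrences.
theorem pvLoopA_invariant (t : List Char) : ∀ p : List Char, p.Nodup → (∀ x ∈ p, x ∉ t) →
    pvLoopA (p ++ t) p.length = p ++ pvDedupLast t := by
  induction t with
  | nil =>
    intro p _ _
    rw [pvLoopA]
    simp [pvDedupLast]
  | cons c t ih =>
    intro p hnd hdisj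
    have hcp : c ∉ p := fun hc => hdisj c hc (by simp)
    have hlen : p.length < (p ++ c :: t).length := by simp
    have hget : (p ++ c :: t)[p.length]'hlen = c := by
      rw [List.getElem_append_right (le_refl p.length)]
      simp
    have hcount : (p ++ c :: t).count c = t.count c + 1 := by
      rw [List.count_append, List.count_cons_self, List.count_eq_zero.mpr hcp]
      omega
    rw [pvLoopA]
    rw [dif_pos hlen]
    simp only [hget, hcount]
    by_cases hct : c ∈ t
    · have hpos : 0 < t.count c := List.count_pos_iff.mpr hct
      rw [if_pos (by omega)]
      have herase : (p ++ c :: t).erase c = p ++ t := by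
        rw [List.erase_append_right _ hcp, List.erase_cons_head]
      rw [herase, ih p hnd (fun x hx => fun hxt => hdisj x hx (List.mem_cons_of_mem _ hxt))]
      simp [pvDedupLast, if_pos hct]
    · have hzero : t.count c = 0 := List.count_eq_zero.mpr hct
      rw [if_neg (by omega)]
      have hstep : p.length + 1 = (p ++ [c]).length := by simp
      have hsplit : p ++ c :: t = (p ++ [c]) ++ t := by simp
      rw [hstep, hsplit,
        ih (p ++ [c])
          (by rw [List.nodup_append]
              refine ⟨hnd, List.nodup_singleton c, ?_⟩
              intro a ha b hb
              simp only [List.mem_singleton] at hb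
              subst hb
              exact fun e => hcp (e ▸ ha))
          (by intro x hx
              rcases List.mem_append.mp hx with h1 | h2
              · exact fun hxt => hdisj x h1 (List.mem_cons_of_mem _ hxt)
              · simp at h2; subst h2; exact hct)]
      simp [pvDedupLast, if_neg hct]

-- A = String.mk (pvDedupLast filtered)
theorem pvA_eq (diz : List (String × Int)) (chiave : String) :
    modifica_chiave diz chiave =
      String.mk (pvDedupLast (chiave.toList.filter (fun lettera => diz.any (fun kv => kv.1.toList == [lettera])))) := by
  unfold modifica_chiave
  rw [PySem.List.foldl_append_if]
  simp only [List.map_id', List.nil_append]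
  have hinv := pvLoopA_invariant
    (chiave.toList.filter (fun lettera => diz.any (fun kv => kv.1.toList == [lettera])))
    [] List.nodup_nil (by simp)
  simp only [List.nil_append, List.length_nil] at hinv
  rw [hinv]

-- dedup-last as a foldr of "prepend if new"
theorem pvDedupLast_foldr (t : List Char) :
    pvDedupLast t = t.foldr (fun c acc => if c ∈ acc then acc else c :: acc) [] := by
  induction t with
  | nil => rfl
  | cons c t ih =>
    simp only [List.foldr_cons, ← ih, pvDedupLast, pvMem_dedupLast]

-- B's fold (append + seen set) mirrors the prepend-if-new fold, reversed
theorem pvB_fold (l : List Char) : ∀ (out : List Char) (seen : PySem.Set Char) (acc : List Char),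
    out = acc.reverse → (∀ x, x ∈ seen ↔ x ∈ acc) →
    (l.foldl (fun (st : List Char × PySem.Set Char) lettera =>
        if PySem.Set.contains st.2 lettera then st else (st.1 ++ [lettera], PySem.Set.add st.2 lettera))
      (out, seen)).1
    = (l.foldl (fun acc c => if c ∈ acc then acc else c :: acc) acc).reverse := by
  induction l with
  | nil => intro out seen acc hout _; simpa using hout
  | cons c l ih =>
    intro out seen acc hout hseen
    simp only [List.foldl_cons]
    by_cases hc : c ∈ acc
    · rw [if_pos ((PySem.Set.contains_iff seen c).mpr ((hseen c).mpr hc)), if_pos hc]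
      exact ih out seen acc hout hseen
    · have hsc : ¬ (PySem.Set.contains seen c = true) :=
        fun h => hc ((hseen c).mp ((PySem.Set.contains_iff seen c).mp h))
      rw [if_neg hsc, if_neg hc]
      refine ih (out ++ [c]) (PySem.Set.add seen c) (c :: acc) (by simp [hout]) ?_
      intro x
      rw [PySem.Set.mem_add]
      simp only [List.mem_cons, hseen x]
      tauto

theorem pvB_eq (diz : List (String × Int)) (chiave : String) :
    modifica_chiave_alt diz chiave =
      String.mk (pvDedupLast (chiave.toList.filter (fun lettera => diz.any (fun kv => kv.1.toList == [lettera])))) := by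
  simp only [modifica_chiave_alt]
  rw [pvB_fold _ [] PySem.Set.empty [] rfl (by intro x; simp [PySem.Set.empty])]
  rw [List.reverse_reverse, pvDedupLast_foldr, List.foldr_eq_foldl_reverse]

-- ===== VERDICT (by name: the statement is the Claim_ definition above) =====
theorem modifica_chiave_spec : Claim_equal_modifica_chiave := by
  intro diz chiave _
  unfold Spec_modifica_chiave
  rw [pvA_eq, pvB_eq]
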